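-- pv_equiv track=rewrite | github.com/ctc316/algorithm-python | Lintcode/G_Practice/Tag_Intervals/843. Digital Flip.py | flipDigit
-- ===== SOURCE A (Python) =====
-- def flipDigit(nums):
--     pre0, pre1 = 0, 0
--     for num in nums:
--         if num:
--             pre0, pre1 = min(pre0, pre1) + 1, pre1
--         else:
--             pre0, pre1 = min(pre0, pre1), pre1 + 1
--
--     return min(pre0, pre1)
-- ===== SOURCE B (Python) =====
-- def flipDigit(nums):
--     # threshold sweep: make nums[:k] all ones, nums[k:] all zeros; minimise over k
--     total1 = 0
--     for x in nums:
--         if x: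
--             total1 += 1
--     best = total1  # k = 0
--     zeros_left = 0
--     ones_left = 0
--     for x in nums:
--         if x:
--             ones_left += 1
--         else:
--             zeros_left += 1
--         cost = zeros_left + (total1 - ones_left)
--         if cost < best:
--             best = cost
--     return best
-- ===== Notes on version B (the rewrite author's own statement) =====
-- stated objective: alternative
-- what changed: Replaces A's per-element two-state DP (carrying min-so-far costs for ending in the zero/one state) by a threshold sweep: count the nonzero entries once, then minimise zeros-in-prefix + ones-in-suffix over all n+1 split points.
import Mathlib
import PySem

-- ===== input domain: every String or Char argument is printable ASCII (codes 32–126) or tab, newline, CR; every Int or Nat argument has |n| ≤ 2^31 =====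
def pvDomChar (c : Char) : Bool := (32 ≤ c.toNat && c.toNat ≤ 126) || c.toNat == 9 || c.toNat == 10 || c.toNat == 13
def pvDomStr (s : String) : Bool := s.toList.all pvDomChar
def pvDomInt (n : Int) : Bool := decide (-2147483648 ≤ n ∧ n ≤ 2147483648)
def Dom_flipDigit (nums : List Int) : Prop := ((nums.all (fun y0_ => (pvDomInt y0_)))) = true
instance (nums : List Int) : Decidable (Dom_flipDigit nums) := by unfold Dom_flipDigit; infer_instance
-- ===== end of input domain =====

-- B replaces A's per-element DP by a single threshold sweep (count the 1s once,
-- then minimise zeros-left + ones-right over every split); objective: alternative.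

-- ===== PORT A =====
def flipDigit (nums : List Int) : Int :=
  let s := nums.foldl (fun (p : Int × Int) num =>
      if num ≠ 0 then (min p.1 p.2 + 1, p.2) else (min p.1 p.2, p.2 + 1)) (0, 0)
  min s.1 s.2

-- ===== PORT B =====
def flipDigit_alt (nums : List Int) : Int :=
  let total1 : Int := nums.foldl (fun acc x => if x ≠ 0 then acc + 1 else acc) 0
  let s := nums.foldl (fun (st : Int × Int × Int) x =>
      let zl := if x ≠ 0 then st.1 else st.1 + 1
      let ol := if x ≠ 0 then st.2.1 + 1 else st.2.1
      let cost := zl + (total1 - ol)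
      (zl, ol, if cost < st.2.2 then cost else st.2.2)) (0, 0, total1)
  s.2.2

-- ===== PRECONDITION & SPEC =====
def Spec_flipDigit (nums : List Int) (out : Int) : Prop := out = flipDigit_alt nums
instance (nums : List Int) (out : Int) : Decidable (Spec_flipDigit nums out) := by unfold Spec_flipDigit; infer_instance

-- ===== CLAIM (what is proved, stated in full; the proofs are below) =====
def Claim_equal_flipDigit : Prop := ∀ (nums : List Int), Dom_flipDigit nums → Spec_flipDigit nums (flipDigit nums)

-- ===== LEMMAS AND PROOFS =====

/-- number of nonzero entries, as an Int -/
def cntNZ : List Int → Int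
  | [] => 0
  | x :: r => (if x ≠ 0 then 1 else 0) + cntNZ r

lemma cntNZ_foldl (l : List Int) : ∀ (a : Int),
    l.foldl (fun acc x => if x ≠ 0 then acc + 1 else acc) a = a + cntNZ l := by
  induction l with
  | nil => intro a; simp [cntNZ]
  | cons x r ih =>
    intro a
    rw [List.foldl_cons]
    by_cases h : x = 0
    · rw [if_neg (by simp [h]), ih, cntNZ]; simp [h]
    · rw [if_pos (by simp [h]), ih, cntNZ]; simp [h]; ring

/-- coupling invariant between A's DP state and B's sweep state -/
lemma loop_eq (t : Int) : ∀ (rest : List Int) (pre0 pre1 ol best : Int),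
    best = min pre0 pre1 + cntNZ rest →
    t - ol = cntNZ rest →
    (rest.foldl (fun (st : Int × Int × Int) x =>
        let zl := if x ≠ 0 then st.1 else st.1 + 1
        let ol := if x ≠ 0 then st.2.1 + 1 else st.2.1
        let cost := zl + (t - ol)
        (zl, ol, if cost < st.2.2 then cost else st.2.2)) (pre1, ol, best)).2.2
      =
    (fun (p : Int × Int) => min p.1 p.2)
      (rest.foldl (fun (p : Int × Int) num =>
        if num ≠ 0 then (min p.1 p.2 + 1, p.2) else (min p.1 p.2, p.2 + 1)) (pre0, pre1)) := by
  intro rest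
  induction rest with
  | nil =>
    intro pre0 pre1 ol best hb _
    simp [cntNZ] at hb
    simp [hb]
  | cons x r ih =>
    intro pre0 pre1 ol best hb ht
    simp only [cntNZ] at hb ht
    rw [List.foldl_cons, List.foldl_cons]
    by_cases h : x = 0
    · simp only [h, ne_eq, not_true_eq_false, if_false]
      rw [ih (min pre0 pre1) (pre1 + 1) ol _ (by omega) (by simp [h] at ht; omega)]
    · simp only [ne_eq, h, not_false_eq_true, if_true]
      rw [ih (min pre0 pre1 + 1) pre1 (ol + 1) _ (by omega) (by simp [h] at ht; omega)]

-- ===== VERDICT (by name: the statement is the Claim_ definition above) =====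
theorem flipDigit_spec : Claim_equal_flipDigit := by
  intro nums _
  unfold Spec_flipDigit flipDigit flipDigit_alt
  rw [cntNZ_foldl nums 0]
  rw [loop_eq (0 + cntNZ nums) nums 0 0 0 (0 + cntNZ nums) (by simp) (by simp)]
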